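-- pv_equiv track=rewrite | github.com/NagasivaKumari/SaathiAI | Backend/src/routes/gamification.py | calculate_level_and_badge
-- ===== SOURCE A (Python) =====
-- LEVEL_THRESHOLDS = {
--     1: 0,
--     2: 100,
--     3: 300,
--     4: 600,
--     5: 1000,
--     6: 1500,
--     7: 2100,
--     8: 2800,
--     9: 3600,
--     10: 4500,
-- }
--
-- def calculate_level_and_badge(points: int):
--     level = 1
--     for lvl, threshold in sorted(LEVEL_THRESHOLDS.items(), reverse=True):
--         if points >= threshold:
--             level = lvl
--             break
--
--     if level >= 10:
--         badge = "Village Sathi Mentor"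
--     elif level >= 7:
--         badge = "Platinum Farmer"
--     elif level >= 4:
--         badge = "Gold Explorer"
--     elif level >= 2:
--         badge = "Silver Learner"
--     else:
--         badge = "Bronze Beginner"
--
--     return level, badge
-- ===== SOURCE B (Python) =====
-- THRESHOLDS = [0, 100, 300, 600, 1000, 1500, 2100, 2800, 3600, 4500]
-- BADGES = ["Bronze Beginner", "Silver Learner", "Silver Learner",
--           "Gold Explorer", "Gold Explorer", "Gold Explorer",
--           "Platinum Farmer", "Platinum Farmer", "Platinum Farmer",
--           "Village Sathi Mentor"]
--
-- def calculate_level_and_badge(points: int):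
--     # binary search: lo ends as the number of thresholds <= points (bisect_right)
--     lo, hi = 0, len(THRESHOLDS)
--     while lo < hi:
--         mid = (lo + hi) // 2
--         if THRESHOLDS[mid] <= points:
--             lo = mid + 1
--         else:
--             hi = mid
--     level = max(1, lo)   # negative points still give level 1
--     return level, BADGES[level - 1]
-- ===== Notes on version B (the rewrite author's own statement) =====
-- stated objective: alternative
-- what changed: Replaces the reverse-sorted dict scan with first-match break and the if/elif badge chain by a hand-written binary search (bisect_right) over an ascending threshold table plus a direct badge-table lookup.
import Mathlib
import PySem

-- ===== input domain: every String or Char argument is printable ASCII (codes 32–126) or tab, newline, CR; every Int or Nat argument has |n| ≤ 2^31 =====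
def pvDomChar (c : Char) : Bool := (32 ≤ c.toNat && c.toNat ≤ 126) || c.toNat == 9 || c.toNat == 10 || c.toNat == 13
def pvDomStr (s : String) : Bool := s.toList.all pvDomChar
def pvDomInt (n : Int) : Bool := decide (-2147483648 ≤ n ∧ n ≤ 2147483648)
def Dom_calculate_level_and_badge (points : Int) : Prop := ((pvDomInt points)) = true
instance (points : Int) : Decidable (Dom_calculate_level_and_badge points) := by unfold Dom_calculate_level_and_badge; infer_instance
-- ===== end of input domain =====

-- B replaces A's reverse-sorted scan + if/elif badge chain by a binary search over an
-- ascending threshold table and a badge-table lookup (alternative algorithm, same cost class).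

-- ===== PORT A =====
def LEVEL_THRESHOLDS : PySem.Dict Int Int :=
  PySem.Dict.ofList [(1, 0), (2, 100), (3, 300), (4, 600), (5, 1000),
                     (6, 1500), (7, 2100), (8, 2800), (9, 3600), (10, 4500)]

-- the loop with its break: first pair (descending) whose threshold is ≤ points; level stays 1 if none
def pvLevelLoop (points : Int) : List (Int × Int) → Int
  | [] => 1
  | (lvl, t) :: rest => if points ≥ t then lvl else pvLevelLoop points rest

def calculate_level_and_badge (points : Int) : Int × String :=
  -- sorted(items, reverse=True): keys are distinct, so Python's tuple comparison only ever
  -- reads the first component; sorting by key .1 is exact here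
  let items := PySem.List.sorted LEVEL_THRESHOLDS.items (fun p => p.1) (reverse := true)
  let level := pvLevelLoop points items
  let badge :=
    if level ≥ 10 then "Village Sathi Mentor"
    else if level ≥ 7 then "Platinum Farmer"
    else if level ≥ 4 then "Gold Explorer"
    else if level ≥ 2 then "Silver Learner"
    else "Bronze Beginner"
  (level, badge)

-- ===== PORT B =====
def pvTHRESHOLDS : List Int := [0, 100, 300, 600, 1000, 1500, 2100, 2800, 3600, 4500]
def pvBADGES : List String :=
  ["Bronze Beginner", "Silver Learner", "Silver Learner",
   "Gold Explorer", "Gold Explorer", "Gold Explorer",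
   "Platinum Farmer", "Platinum Farmer", "Platinum Farmer",
   "Village Sathi Mentor"]

-- the while-loop binary search of Source B; lo, hi are nonnegative indices in [0, 10], so Nat
-- division by 2 equals Python's // and getD never pads
def pvBisect (points : Int) (lo hi : Nat) : Nat :=
  if lo < hi then
    let mid := (lo + hi) / 2
    if pvTHRESHOLDS.getD mid 0 ≤ points then pvBisect points (mid + 1) hi
    else pvBisect points lo mid
  else lo
termination_by hi - lo
decreasing_by all_goals omega

def calculate_level_and_badge_alt (points : Int) : Int × String :=
  let lo := pvBisect points 0 10
  let level : Nat := max 1 lo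
  ((level : Int), pvBADGES.getD (level - 1) "")

-- ===== PRECONDITION & SPEC =====
def Spec_calculate_level_and_badge (points : Int) (out : Int × String) : Prop := out = calculate_level_and_badge_alt points
instance (points : Int) (out : Int × String) : Decidable (Spec_calculate_level_and_badge points out) := by unfold Spec_calculate_level_and_badge; infer_instance

-- ===== CLAIM (what is proved, stated in full; the proofs are below) =====
def Claim_equal_calculate_level_and_badge : Prop := ∀ (points : Int), Dom_calculate_level_and_badge points → Spec_calculate_level_and_badge points (calculate_level_and_badge points)

-- ===== LEMMAS AND PROOFS =====

-- ===== VERDICT (by name: the statement is the Claim_ definition above) =====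
set_option maxHeartbeats 1000000 in
theorem calculate_level_and_badge_spec : Claim_equal_calculate_level_and_badge := by
  intro points _
  unfold Spec_calculate_level_and_badge calculate_level_and_badge calculate_level_and_badge_alt
  have hsort : PySem.List.sorted LEVEL_THRESHOLDS.items (fun p => p.1) (reverse := true)
      = [(10, 4500), (9, 3600), (8, 2800), (7, 2100), (6, 1500),
         (5, 1000), (4, 600), (3, 300), (2, 100), (1, 0)] := by decide
  rw [hsort]
  by_cases h9 : (4500:Int) ≤ points
  · simp [pvBisect, pvLevelLoop, pvTHRESHOLDS, pvBADGES, ge_iff_le, show (1500:Int) ≤ points from by omega, show (3600:Int) ≤ points from by omega, show (4500:Int) ≤ points from by omega]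
  by_cases h8 : (3600:Int) ≤ points
  · simp [pvBisect, pvLevelLoop, pvTHRESHOLDS, pvBADGES, ge_iff_le, show (1500:Int) ≤ points from by omega, show (3600:Int) ≤ points from by omega, show ¬((4500:Int) ≤ points) from by omega]
  by_cases h7 : (2800:Int) ≤ points
  · simp [pvBisect, pvLevelLoop, pvTHRESHOLDS, pvBADGES, ge_iff_le, show (1500:Int) ≤ points from by omega, show (2800:Int) ≤ points from by omega, show ¬((3600:Int) ≤ points) from by omega, show ¬((4500:Int) ≤ points) from by omega]
  by_cases h6 : (2100:Int) ≤ points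
  · simp [pvBisect, pvLevelLoop, pvTHRESHOLDS, pvBADGES, ge_iff_le, show (1500:Int) ≤ points from by omega, show (2100:Int) ≤ points from by omega, show ¬((2800:Int) ≤ points) from by omega, show ¬((3600:Int) ≤ points) from by omega, show ¬((4500:Int) ≤ points) from by omega]
  by_cases h5 : (1500:Int) ≤ points
  · simp [pvBisect, pvLevelLoop, pvTHRESHOLDS, pvBADGES, ge_iff_le, show (1500:Int) ≤ points from by omega, show ¬((2100:Int) ≤ points) from by omega, show ¬((2800:Int) ≤ points) from by omega, show ¬((3600:Int) ≤ points) from by omega, show ¬((4500:Int) ≤ points) from by omega]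
  by_cases h4 : (1000:Int) ≤ points
  · simp [pvBisect, pvLevelLoop, pvTHRESHOLDS, pvBADGES, ge_iff_le, show (300:Int) ≤ points from by omega, show (1000:Int) ≤ points from by omega, show ¬((1500:Int) ≤ points) from by omega, show ¬((2100:Int) ≤ points) from by omega, show ¬((2800:Int) ≤ points) from by omega, show ¬((3600:Int) ≤ points) from by omega, show ¬((4500:Int) ≤ points) from by omega]
  by_cases h3 : (600:Int) ≤ points
  · simp [pvBisect, pvLevelLoop, pvTHRESHOLDS, pvBADGES, ge_iff_le, show (300:Int) ≤ points from by omega, show (600:Int) ≤ points from by omega, show ¬((1000:Int) ≤ points) from by omega, show ¬((1500:Int) ≤ points) from by omega, show ¬((2100:Int) ≤ points) from by omega, show ¬((2800:Int) ≤ points) from by omega, show ¬((3600:Int) ≤ points) from by omega, show ¬((4500:Int) ≤ points) from by omega]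
  by_cases h2 : (300:Int) ≤ points
  · simp [pvBisect, pvLevelLoop, pvTHRESHOLDS, pvBADGES, ge_iff_le, show (300:Int) ≤ points from by omega, show ¬((600:Int) ≤ points) from by omega, show ¬((1000:Int) ≤ points) from by omega, show ¬((1500:Int) ≤ points) from by omega, show ¬((2100:Int) ≤ points) from by omega, show ¬((2800:Int) ≤ points) from by omega, show ¬((3600:Int) ≤ points) from by omega, show ¬((4500:Int) ≤ points) from by omega]
  by_cases h1 : (100:Int) ≤ points
  · simp [pvBisect, pvLevelLoop, pvTHRESHOLDS, pvBADGES, ge_iff_le, show (100:Int) ≤ points from by omega, show ¬((300:Int) ≤ points) from by omega, show ¬((600:Int) ≤ points) from by omega, show ¬((1000:Int) ≤ points) from by omega, show ¬((1500:Int) ≤ points) from by omega, show ¬((2100:Int) ≤ points) from by omega, show ¬((2800:Int) ≤ points) from by omega, show ¬((3600:Int) ≤ points) from by omega, show ¬((4500:Int) ≤ points) from by omega]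
  by_cases h0 : (0:Int) ≤ points
  · simp [pvBisect, pvLevelLoop, pvTHRESHOLDS, pvBADGES, ge_iff_le, show (0:Int) ≤ points from by omega, show ¬((100:Int) ≤ points) from by omega, show ¬((300:Int) ≤ points) from by omega, show ¬((600:Int) ≤ points) from by omega, show ¬((1000:Int) ≤ points) from by omega, show ¬((1500:Int) ≤ points) from by omega, show ¬((2100:Int) ≤ points) from by omega, show ¬((2800:Int) ≤ points) from by omega, show ¬((3600:Int) ≤ points) from by omega, show ¬((4500:Int) ≤ points) from by omega]
  · simp [pvBisect, pvLevelLoop, pvTHRESHOLDS, pvBADGES, ge_iff_le, show ¬((0:Int) ≤ points) from by omega, show ¬((100:Int) ≤ points) from by omega, show ¬((300:Int) ≤ points) from by omega, show ¬((600:Int) ≤ points) from by omega, show ¬((1000:Int) ≤ points) from by omega, show ¬((1500:Int) ≤ points) from by omega, show ¬((2100:Int) ≤ points) from by omega, show ¬((2800:Int) ≤ points) from by omega, show ¬((3600:Int) ≤ points) from by omega, show ¬((4500:Int) ≤ points) from by omega]
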